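-- pv_equiv track=rewrite | github.com/kadarferi/ipsubnetcalc | IPSubnetCalc.py | dotquad_to_binmtx
-- ===== SOURCE A (Python) =====
-- def decimal_to_binarray(n):
--     """8 bites számokat 0/1-ok 8 hosszú tömbjévé alakít"""
--     bin = []
--
--     def decimal_to_binarray_rec(n):
--         if (n > 1):
--             # divide with integral result
--             # (discard remainder)
--             decimal_to_binarray_rec(n // 2)
--
--         bin.append(n % 2)
--
--     decimal_to_binarray_rec(n)
--     bin = [0] * (8 - len(bin)) + bin
--     return bin
--
-- def dotquad_to_binmtx(dq):
--     """Decimális x.x.x.x alakú ip címet / maskot átalakít bináris tömbbé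
--     """
--     da = dq.split('.')
--     da = [int(d) for d in da]
--     bm = []
--     for d in da:
--         b = decimal_to_binarray(d)
--         bm = bm + b
--     return bm
-- ===== SOURCE B (Python) =====
-- def dotquad_to_binmtx(dq):
--     """Decimal x.x.x.x IP string to binary digit array (iterative converter)."""
--     bm = []
--     for part in dq.split('.'):
--         m = int(part)
--         digits = []
--         while m > 1:
--             digits.append(m % 2)
--             m = m // 2
--         digits.append(m % 2)
--         digits.reverse()
--         bm.extend([0] * (8 - len(digits)) + digits)
--     return bm
-- ===== Notes on version B (the rewrite author's own statement) =====
-- stated objective: alternative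
-- what changed: The per-octet converter is rewritten from a recursive inner helper that prepends high bits via the call stack into an explicit iterative while-loop that collects low bits and reverses at the end; the outer split/parse/concatenate stays a single pass.
import Mathlib
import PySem

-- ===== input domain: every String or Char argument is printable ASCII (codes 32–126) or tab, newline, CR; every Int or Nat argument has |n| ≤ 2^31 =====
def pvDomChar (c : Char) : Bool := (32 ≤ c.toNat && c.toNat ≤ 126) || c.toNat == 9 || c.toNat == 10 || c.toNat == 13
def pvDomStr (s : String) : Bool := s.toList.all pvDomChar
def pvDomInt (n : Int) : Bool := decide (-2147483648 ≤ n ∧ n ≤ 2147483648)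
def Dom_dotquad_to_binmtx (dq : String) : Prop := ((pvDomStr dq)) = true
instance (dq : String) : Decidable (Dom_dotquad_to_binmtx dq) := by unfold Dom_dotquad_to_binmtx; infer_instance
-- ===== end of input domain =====

-- B replaces A's recursive bit helper by an explicit iterative loop (different decomposition, same cost).

-- ===== PORT A =====
-- inner recursive helper: decimal_to_binarray_rec, returning the digits it appends to `bin`
def binrecA (n : Int) : List Int :=
  if 1 < n then binrecA (PySem.Int.floordiv n 2) ++ [PySem.Int.mod n 2]
  else [PySem.Int.mod n 2]
termination_by n.toNat
decreasing_by
  rw [PySem.Int.floordiv_eq_ediv_of_pos (by omega : (0:Int) < 2)]; omega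

def decimal_to_binarray (n : Int) : List Int :=
  let bin := binrecA n
  List.replicate (8 - bin.length) 0 ++ bin

def dotquad_to_binmtx (dq : String) : List Int :=
  let da := PySem.Chars.splitOn dq.toList ['.']
  -- int(d): Pre_ excludes inputs where int() raises ValueError, so getD 0 is never taken
  let da := da.map (fun d => (PySem.Int.ofChars? d).getD 0)
  da.foldl (fun bm d => bm ++ decimal_to_binarray d) []

-- ===== PORT B =====
-- iterative while-loop: append m % 2, halve, until m ≤ 1; final digit appended after the loop
def binloopB (m : Int) (digits : List Int) : List Int :=
  if 1 < m then binloopB (PySem.Int.floordiv m 2) (digits ++ [PySem.Int.mod m 2])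
  else digits ++ [PySem.Int.mod m 2]
termination_by m.toNat
decreasing_by
  rw [PySem.Int.floordiv_eq_ediv_of_pos (by omega : (0:Int) < 2)]; omega

def dotquad_to_binmtx_alt (dq : String) : List Int :=
  (PySem.Chars.splitOn dq.toList ['.']).foldl (fun bm part =>
    let m := (PySem.Int.ofChars? part).getD 0
    let digits := (binloopB m []).reverse
    bm ++ (List.replicate (8 - digits.length) 0 ++ digits)) []

-- ===== PRECONDITION & SPEC =====
-- exactly the inputs where every dot-separated piece parses as a Python int (else A raises ValueError)
def Pre_dotquad_to_binmtx (dq : String) : Prop :=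
  ∀ p ∈ PySem.Chars.splitOn dq.toList ['.'], (PySem.Int.ofChars? p).isSome = true
instance (dq : String) : Decidable (Pre_dotquad_to_binmtx dq) := by
  unfold Pre_dotquad_to_binmtx; infer_instance
def pvWitness_dotquad_to_binmtx : String := "192.168.0.1"

def Spec_dotquad_to_binmtx (dq : String) (out : List Int) : Prop := out = dotquad_to_binmtx_alt dq
instance (dq : String) (out : List Int) : Decidable (Spec_dotquad_to_binmtx dq out) := by
  unfold Spec_dotquad_to_binmtx; infer_instance

-- ===== CLAIM (what is proved, stated in full; the proofs are below) =====
def Claim_equal_dotquad_to_binmtx : Prop := ∀ (dq : String), Dom_dotquad_to_binmtx dq → Pre_dotquad_to_binmtx dq → Spec_dotquad_to_binmtx dq (dotquad_to_binmtx dq)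

-- ===== LEMMAS AND PROOFS =====
theorem binloopB_reverse (m : Int) (acc : List Int) :
    (binloopB m acc).reverse = binrecA m ++ acc.reverse := by
  induction m, acc using binloopB.induct with
  | case1 m acc h ih =>
    rw [binloopB, if_pos h, ih]
    conv_rhs => rw [binrecA, if_pos h]
    simp
  | case2 m acc h =>
    rw [binloopB, if_neg h, binrecA, if_neg h]
    simp

theorem binloopB_eq_binrecA (m : Int) : (binloopB m []).reverse = binrecA m := by
  simpa using binloopB_reverse m []

-- ===== VERDICT (by name: the statement is the Claim_ definition above) =====
theorem dotquad_to_binmtx_spec : Claim_equal_dotquad_to_binmtx := by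
  intro dq _ _
  unfold Spec_dotquad_to_binmtx dotquad_to_binmtx dotquad_to_binmtx_alt
  rw [List.foldl_map]
  congr 1
  funext bm p
  simp [decimal_to_binarray, binloopB_eq_binrecA]
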